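-- pv_equiv track=rewrite | github.com/rishuu300/DSA | Difficulty: Easy/The Modified String/the-modified-string.py | modified
-- ===== SOURCE A (Python) =====
-- def modified(s):
--     count, res = 1, 0
--     prev = s[0]
--
--     for i in range(1, len(s)):
--         char = s[i]
--
--         if char == prev:
--             count += 1
--         else:
--             prev = char
--             count = 1
--
--         if count == 3:
--             res += 1
--             count = 1
--
--     if count == 3:
--         res += 1
--
--     return res
-- ===== SOURCE B (Python) =====
-- def modified(s):
--     res = 0
--     i, n = 0, len(s)
--     while i < n:
--         j = i + 1
--         while j < n and s[j] == s[i]: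
--             j += 1
--         res += (j - i - 1) // 2
--         i = j
--     return res
-- ===== Notes on version B (the rewrite author's own statement) =====
-- stated objective: simpler
-- what changed: B scans the string as maximal runs of equal characters and adds the closed-form (L-1)//2 per run of length L, replacing A's per-character counter that is reset to 1 after each counted triple.
import Mathlib
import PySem

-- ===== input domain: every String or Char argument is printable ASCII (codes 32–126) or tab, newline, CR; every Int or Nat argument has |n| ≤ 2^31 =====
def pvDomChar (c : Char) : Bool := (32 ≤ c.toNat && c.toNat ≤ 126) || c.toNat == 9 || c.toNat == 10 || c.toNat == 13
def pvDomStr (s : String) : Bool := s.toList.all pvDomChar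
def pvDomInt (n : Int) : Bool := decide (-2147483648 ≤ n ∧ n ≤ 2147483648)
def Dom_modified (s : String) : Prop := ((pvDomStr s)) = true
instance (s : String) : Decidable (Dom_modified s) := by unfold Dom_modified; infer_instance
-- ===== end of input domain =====

-- B replaces A's per-character counter (reset to 1 after each counted triple) by maximal-run
-- grouping with the closed form (L-1)//2 per run; same return value on every nonempty string.

-- ===== PORT A =====
-- one loop iteration of A: updates (count, res, prev) for the next character
def stepA (st : Int × Int × Char) (char : Char) : Int × Int × Char :=
  let count := st.1
  let res := st.2.1
  let prev := st.2.2
  let (count, prev) := if char = prev then (count + 1, prev) else ((1 : Int), char)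
  let (count, res) := if count = 3 then ((1 : Int), res + 1) else (count, res)
  (count, res, prev)

def modified (s : String) : Int :=
  match s.toList with
  | [] => 0  -- Python raises IndexError at s[0] here; excluded by Pre_modified
  | c :: rest =>
    let st := rest.foldl stepA (1, 0, c)
    if st.1 = 3 then st.2.1 + 1 else st.2.1

-- ===== PORT B =====
-- B's outer while loop: consume one maximal run (inner while = takeWhile/dropWhile), add (L-1)//2
def altB : List Char → Int
  | [] => 0
  | c :: rest =>
    PySem.Int.floordiv (((1 : Int) + (rest.takeWhile (· = c)).length) - 1) 2
      + altB (rest.dropWhile (· = c))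
termination_by l => l.length
decreasing_by
  simp only [List.length_cons]
  exact Nat.lt_succ_of_le (List.length_dropWhile_le _ _)

def modified_alt (s : String) : Int := altB s.toList

-- ===== PRECONDITION & SPEC =====
-- Pre_ excludes exactly the empty string, on which A raises IndexError (s[0]).
def Pre_modified (s : String) : Prop := s ≠ ""
instance (s : String) : Decidable (Pre_modified s) := by unfold Pre_modified; infer_instance
def pvWitness_modified : String := "aab"

def Spec_modified (s : String) (out : Int) : Prop := out = modified_alt s
instance (s : String) (out : Int) : Decidable (Spec_modified s out) := by unfold Spec_modified; infer_instance

-- ===== CLAIM (what is proved, stated in full; the proofs are below) =====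
def Claim_equal_modified : Prop := ∀ (s : String), Dom_modified s → Pre_modified s → Spec_modified s (modified s)

-- ===== LEMMAS AND PROOFS =====

-- lengths of the maximal runs of equal characters, in traversal order
def runsOf : List Char → List Nat
  | [] => []
  | c :: rest => (1 + (rest.takeWhile (· = c)).length) :: runsOf (rest.dropWhile (· = c))
termination_by l => l.length
decreasing_by
  simp only [List.length_cons]
  exact Nat.lt_succ_of_le (List.length_dropWhile_le _ _)

-- A's (and B's) total: (L-1)/2 summed over the maximal run lengths
def sumA (rs : List Nat) : Int := ((rs.map (fun L => (L - 1) / 2)).sum : Nat)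

lemma sumA_cons (a : Nat) (t : List Nat) : sumA (a :: t) = (((a - 1) / 2 : Nat) : Int) + sumA t := by
  simp [sumA]

lemma foldA_spec : ∀ (l : List Char) (c : Char) (count res : Int), (count = 1 ∨ count = 2) →
    (List.foldl stepA (count, res, c) l).2.1
      = res + (((count.toNat + (l.takeWhile (· = c)).length - 1) / 2 - (count.toNat - 1) / 2 : Nat) : Int)
          + sumA (runsOf (l.dropWhile (· = c)))
    ∧ ((List.foldl stepA (count, res, c) l).1 = 1 ∨ (List.foldl stepA (count, res, c) l).1 = 2) := by
  intro l
  induction l with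
  | nil =>
    intro c count res h
    rcases h with rfl | rfl <;>
      simp [sumA, runsOf]
  | cons a l ih =>
    intro c count res h
    by_cases hac : a = c
    · subst hac
      have htw : (a :: l).takeWhile (· = a) = a :: l.takeWhile (· = a) := by simp
      have hdw : (a :: l).dropWhile (· = a) = l.dropWhile (· = a) := by simp
      rcases h with rfl | rfl
      · have hs : stepA (1, res, a) a = (2, res, a) := by norm_num [stepA]
        rw [List.foldl_cons, hs]
        obtain ⟨h1, h2⟩ := ih a 2 res (Or.inr rfl)
        refine ⟨?_, h2⟩
        rw [h1, htw, hdw]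
        simp only [List.length_cons, show (1:Int).toNat = 1 from rfl, show (2:Int).toNat = 2 from rfl]
        have : ((2 + (l.takeWhile (· = a)).length - 1) / 2 - (2 - 1) / 2 : Nat)
            = ((1 + ((l.takeWhile (· = a)).length + 1) - 1) / 2 - (1 - 1) / 2 : Nat) := by omega
        rw [this]
      · have hs : stepA (2, res, a) a = (1, res + 1, a) := by norm_num [stepA]
        rw [List.foldl_cons, hs]
        obtain ⟨h1, h2⟩ := ih a 1 (res + 1) (Or.inl rfl)
        refine ⟨?_, h2⟩
        rw [h1, htw, hdw]
        simp only [List.length_cons, show (1:Int).toNat = 1 from rfl, show (2:Int).toNat = 2 from rfl]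
        have : ((2 + ((l.takeWhile (· = a)).length + 1) - 1) / 2 - (2 - 1) / 2 : Nat)
            = ((1 + (l.takeWhile (· = a)).length - 1) / 2 - (1 - 1) / 2 : Nat) + 1 := by omega
        rw [this]
        push_cast
        ring
    · have hs : stepA (count, res, c) a = (1, res, a) := by
        rcases h with rfl | rfl <;> simp [stepA, hac]
      have htw : (a :: l).takeWhile (· = c) = [] := by simp [hac]
      have hdw : (a :: l).dropWhile (· = c) = a :: l := by simp [hac]
      rw [List.foldl_cons, hs]
      obtain ⟨h1, h2⟩ := ih a 1 res (Or.inl rfl)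
      refine ⟨?_, h2⟩
      rw [h1, htw, hdw, runsOf, sumA_cons]
      simp only [List.length_nil, show (1:Int).toNat = 1 from rfl]
      have hz : ((count.toNat + 0 - 1) / 2 - (count.toNat - 1) / 2 : Nat) = 0 := by omega
      have hz2 : ((1 + (l.takeWhile (· = a)).length - 1) / 2 - (1 - 1) / 2 : Nat)
          = ((1 + (l.takeWhile (· = a)).length - 1) / 2 : Nat) := by omega
      rw [hz, hz2]
      push_cast
      ring

lemma modified_eq_sumA (s : String) (h : s ≠ "") : modified s = sumA (runsOf s.toList) := by
  have hl : s.toList ≠ [] := fun hc => h (String.toList_eq_nil_iff.mp hc)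
  unfold modified
  cases hlist : s.toList with
  | nil => exact absurd hlist hl
  | cons c rest =>
    obtain ⟨h1, h2⟩ := foldA_spec rest c 1 0 (Or.inl rfl)
    have hne : (List.foldl stepA (1, 0, c) rest).1 ≠ 3 := by rcases h2 with h2 | h2 <;> omega
    simp only [hne, if_false, h1, runsOf, sumA, List.map_cons, List.sum_cons]
    push_cast [sumA]
    ring_nf
    omega

lemma altB_eq_sumA : ∀ l : List Char, altB l = sumA (runsOf l) := by
  intro l
  induction l using runsOf.induct with
  | case1 => simp [altB, runsOf, sumA]
  | case2 c rest ih =>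
    rw [altB, runsOf, sumA_cons, ih]
    have h1 : ((1 : Int) + (rest.takeWhile (· = c)).length) - 1
        = (((rest.takeWhile (· = c)).length : Nat) : Int) := by ring
    have h2 : ((1 + (rest.takeWhile (· = c)).length - 1) / 2 : Nat)
        = ((rest.takeWhile (· = c)).length / 2 : Nat) := by omega
    rw [h1, h2, show ((2:Int) = ((2:Nat):Int)) from rfl, PySem.Int.floordiv_natCast]

-- ===== VERDICT (by name: the statement is the Claim_ definition above) =====
theorem modified_spec : Claim_equal_modified := by
  intro s _ hpre
  show modified s = modified_alt s
  rw [modified_eq_sumA s hpre]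
  unfold modified_alt
  rw [altB_eq_sumA]
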